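-- pv_equiv track=rewrite | github.com/AbdelazezMohamedAzez/cloud-threat-detection | scripts/preprocessing/finalize_alerts.py | strict_is_automation_user
-- ===== SOURCE A (Python) =====
-- def strict_is_automation_user(username: str) -> int:
--     u = str(username).strip().lower()
--
--     patterns = [
--         "aws:",
--         "awsservicerole",
--         "config-role",
--         "service-role",
--         "lambda_",
--         "lambdabasicexecution",
--         "lambda_basic_execution",
--         "cloudtrail",
--         "organizations",
--         "configmultiaccountsetup",
--     ]
--
--     exact = {
--         "aws:ec2-instance",
--         "awsserviceroleforsupport",
--         "awsserviceroleforcloudtrail",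
--         "awsservicerolefororganizations",
--         "awsserviceroleforconfigmultiaccountsetup",
--         "lambda_basic_execution",
--     }
--
--     if u in exact:
--         return 1
--
--     for p in patterns:
--         if u.startswith(p) or p in u:
--             return 1
--
--     return 0
-- ===== SOURCE B (Python) =====
-- def strict_is_automation_user(username: str) -> int:
--     # Every member of A's `exact` set contains one of the patterns, and
--     # startswith(p) implies substring containment, so the whole test reduces
--     # to: does any (non-redundant) pattern occur as a substring?
--     u = str(username).strip().lower()
--     needles = [
--         "aws:",
--         "awsservicerole",
--         "config-role",
--         "service-role",
--         "lambda_",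
--         "lambdabasicexecution",
--         "cloudtrail",
--         "organizations",
--         "configmultiaccountsetup",
--     ]
--     return int(any(p in u for p in needles))
-- ===== Notes on version B (the rewrite author's own statement) =====
-- stated objective: simpler
-- what changed: B drops A's redundant exact-match set (each member contains one of the patterns) and the startswith test (subsumed by substring containment), and merges the one pattern that contains another into the shorter one, reducing the whole body to a single any-substring test over a non-redundant pattern list.
import Mathlib
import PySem

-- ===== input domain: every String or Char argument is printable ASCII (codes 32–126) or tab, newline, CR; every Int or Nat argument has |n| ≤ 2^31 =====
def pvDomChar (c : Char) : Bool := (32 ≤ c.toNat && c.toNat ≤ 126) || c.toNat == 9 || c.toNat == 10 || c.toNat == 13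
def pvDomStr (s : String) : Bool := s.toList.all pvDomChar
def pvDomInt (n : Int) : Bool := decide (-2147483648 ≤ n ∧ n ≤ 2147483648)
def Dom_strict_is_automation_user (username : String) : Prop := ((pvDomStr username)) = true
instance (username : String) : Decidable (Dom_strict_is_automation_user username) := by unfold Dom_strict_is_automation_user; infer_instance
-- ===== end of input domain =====

-- B replaces A's redundant exact-match set plus startswith/substring loop by a single
-- any-substring test over a non-redundant pattern list (objective: simpler).

-- ===== PORT A =====
def auPatterns : List String := [
  "aws:",
  "awsservicerole",
  "config-role",
  "service-role",
  "lambda_",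
  "lambdabasicexecution",
  "lambda_basic_execution",
  "cloudtrail",
  "organizations",
  "configmultiaccountsetup"]

def auExact : PySem.Set String := PySem.Set.ofList [
  "aws:ec2-instance",
  "awsserviceroleforsupport",
  "awsserviceroleforcloudtrail",
  "awsservicerolefororganizations",
  "awsserviceroleforconfigmultiaccountsetup",
  "lambda_basic_execution"]

-- the 'for p in patterns' loop of A: first match returns 1, fall-through returns 0
def auLoop (ps : List String) (u : String) : Int :=
  match ps with
  | [] => 0
  | p :: rest => if PySem.Str.startswith u p || PySem.Str.isIn p u then 1 else auLoop rest u

def strict_is_automation_user (username : String) : Int :=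
  let u := PySem.Str.lower (PySem.Str.strip username)
  if PySem.Set.contains auExact u then 1
  else auLoop auPatterns u

-- ===== PORT B =====
def auNeedles : List String := [
  "aws:",
  "awsservicerole",
  "config-role",
  "service-role",
  "lambda_",
  "lambdabasicexecution",
  "cloudtrail",
  "organizations",
  "configmultiaccountsetup"]

def strict_is_automation_user_alt (username : String) : Int :=
  let u := PySem.Str.lower (PySem.Str.strip username)
  if auNeedles.any (fun p => PySem.Str.isIn p u) then 1 else 0

-- ===== PRECONDITION & SPEC =====
def Spec_strict_is_automation_user (username : String) (out : Int) : Prop := out = strict_is_automation_user_alt username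
instance (username : String) (out : Int) : Decidable (Spec_strict_is_automation_user username out) := by unfold Spec_strict_is_automation_user; infer_instance

-- ===== CLAIM (what is proved, stated in full; the proofs are below) =====
def Claim_equal_strict_is_automation_user : Prop := ∀ (username : String), Dom_strict_is_automation_user username → Spec_strict_is_automation_user username (strict_is_automation_user username)

-- ===== LEMMAS AND PROOFS =====

-- substring containment is monotone: if b occurs in u and a occurs in b, a occurs in u
lemma isIn_of_infix_isIn (a b u : String) (hab : a.toList <:+: b.toList)
    (h : PySem.Str.isIn b u = true) : PySem.Str.isIn a u = true := by
  rw [PySem.Str.isIn_iff_infix] at h ⊢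
  exact hab.trans h

-- u.startswith(p) implies p in u
lemma isIn_of_startswith (u p : String) (h : PySem.Str.startswith u p = true) :
    PySem.Str.isIn p u = true := by
  rw [PySem.Str.isIn_iff_infix]
  simp only [PySem.Str.startswith_eq] at h
  exact ((PySem.Chars.startswith_iff _ _).mp h).isInfix

-- A's loop is the any-test over its pattern list
lemma auLoop_eq (ps : List String) (u : String) :
    auLoop ps u = if ps.any (fun p => PySem.Str.startswith u p || PySem.Str.isIn p u) then 1 else 0 := by
  induction ps with
  | nil => simp [auLoop]
  | cons p rest ih =>
    rw [show auLoop (p :: rest) u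
          = if PySem.Str.startswith u p || PySem.Str.isIn p u then 1 else auLoop rest u from rfl,
       List.any_cons, ih]
    cases h : (PySem.Str.startswith u p || PySem.Str.isIn p u) <;> simp

-- the core boolean identity on the normalized string
lemma core_eq (u : String) :
    (PySem.Set.contains auExact u ||
      auPatterns.any (fun p => PySem.Str.startswith u p || PySem.Str.isIn p u)) =
    auNeedles.any (fun p => PySem.Str.isIn p u) := by
  rw [Bool.eq_iff_iff, Bool.or_eq_true, List.any_eq_true, List.any_eq_true,
      PySem.Set.contains_iff]
  constructor
  · rintro (h | ⟨p, hp, hor⟩)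
    · -- every member of the exact set contains a needle as a substring
      have he : auExact = ["aws:ec2-instance", "awsserviceroleforsupport",
          "awsserviceroleforcloudtrail", "awsservicerolefororganizations",
          "awsserviceroleforconfigmultiaccountsetup", "lambda_basic_execution"] := by decide
      rw [he, List.mem_cons, List.mem_cons, List.mem_cons, List.mem_cons, List.mem_cons,
          List.mem_singleton] at h
      rcases h with rfl | rfl | rfl | rfl | rfl | rfl
      exacts [⟨"aws:", by decide, by decide⟩,
        ⟨"awsservicerole", by decide, by decide⟩,
        ⟨"awsservicerole", by decide, by decide⟩,
        ⟨"awsservicerole", by decide, by decide⟩,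
        ⟨"awsservicerole", by decide, by decide⟩,
        ⟨"lambda_", by decide, by decide⟩]
    · have hin : PySem.Str.isIn p u = true := by
        cases hsw : PySem.Str.startswith u p with
        | true => exact isIn_of_startswith u p hsw
        | false => rw [hsw, Bool.false_or] at hor; exact hor
      simp only [auPatterns, List.mem_cons, List.not_mem_nil, or_false] at hp
      rcases hp with rfl | rfl | rfl | rfl | rfl | rfl | rfl | rfl | rfl | rfl
      exacts [⟨"aws:", by decide, hin⟩,
        ⟨"awsservicerole", by decide, hin⟩,
        ⟨"config-role", by decide, hin⟩,
        ⟨"service-role", by decide, hin⟩,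
        ⟨"lambda_", by decide, hin⟩,
        ⟨"lambdabasicexecution", by decide, hin⟩,
        ⟨"lambda_", by decide,
          isIn_of_infix_isIn "lambda_" "lambda_basic_execution" u (by decide) hin⟩,
        ⟨"cloudtrail", by decide, hin⟩,
        ⟨"organizations", by decide, hin⟩,
        ⟨"configmultiaccountsetup", by decide, hin⟩]
  · rintro ⟨p, hp, hin⟩
    right
    simp only [auNeedles, List.mem_cons, List.not_mem_nil, or_false] at hp
    rcases hp with rfl | rfl | rfl | rfl | rfl | rfl | rfl | rfl | rfl
    exacts [⟨"aws:", by decide, by rw [hin, Bool.or_true]⟩,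
      ⟨"awsservicerole", by decide, by rw [hin, Bool.or_true]⟩,
      ⟨"config-role", by decide, by rw [hin, Bool.or_true]⟩,
      ⟨"service-role", by decide, by rw [hin, Bool.or_true]⟩,
      ⟨"lambda_", by decide, by rw [hin, Bool.or_true]⟩,
      ⟨"lambdabasicexecution", by decide, by rw [hin, Bool.or_true]⟩,
      ⟨"cloudtrail", by decide, by rw [hin, Bool.or_true]⟩,
      ⟨"organizations", by decide, by rw [hin, Bool.or_true]⟩,
      ⟨"configmultiaccountsetup", by decide, by rw [hin, Bool.or_true]⟩]

-- the two bodies agree on the already-normalized string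
lemma body_eq (u : String) :
    (if PySem.Set.contains auExact u then (1 : Int) else auLoop auPatterns u) =
    (if auNeedles.any (fun p => PySem.Str.isIn p u) then (1 : Int) else 0) := by
  have h := core_eq u
  cases hex : PySem.Set.contains auExact u
  · rw [hex, Bool.false_or] at h
    rw [auLoop_eq, h]
    simp
  · rw [hex, Bool.true_or] at h
    rw [← h]
    simp

-- ===== VERDICT (by name: the statement is the Claim_ definition above) =====
theorem strict_is_automation_user_spec : Claim_equal_strict_is_automation_user := by
  intro username _
  unfold Spec_strict_is_automation_user strict_is_automation_user strict_is_automation_user_alt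
  exact body_eq (PySem.Str.lower (PySem.Str.strip username))
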